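-- pv_equiv track=rewrite | github.com/cocotools/CoCoTools | cocotools/mapgraph.py | _from_different_maps
-- ===== SOURCE A (Python) =====
-- def _from_different_maps(source, tp, target):
--     """Return True if no two nodes are from the same BrainMap.
--
--     Parameters
--     ----------
--     source : string
--       A node in the graph.
--
--     tp : list
--       Transformation path from source to target.
--
--     target : string
--       Another node in the graph.
--
--     Returns
--     -------
--     True or False : boolean
--     """
--     map_list = []
--     nodes = tp + [source, target]
--     for n in nodes:
--         brain_map = n.split('-')[0]
--         if brain_map in map_list:
--             return False
--         map_list.append(brain_map)
--     return True
-- ===== SOURCE B (Python) =====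
-- def _from_different_maps(source, tp, target):
--     """Return True if no two nodes are from the same BrainMap.
--
--     Build the full list of BrainMap prefixes first, then sort it and
--     scan once for an equal adjacent pair.
--     """
--     prefixes = sorted(n.split('-')[0] for n in tp + [source, target])
--     for i in range(1, len(prefixes)):
--         if prefixes[i - 1] == prefixes[i]:
--             return False
--     return True
-- ===== Notes on version B (the rewrite author's own statement) =====
-- stated objective: alternative
-- what changed: Replaces the incremental membership-check loop with early return by a compute-all-then-compare decomposition: build the full prefix list, sort it, and scan once for an equal adjacent pair.
import Mathlib
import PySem

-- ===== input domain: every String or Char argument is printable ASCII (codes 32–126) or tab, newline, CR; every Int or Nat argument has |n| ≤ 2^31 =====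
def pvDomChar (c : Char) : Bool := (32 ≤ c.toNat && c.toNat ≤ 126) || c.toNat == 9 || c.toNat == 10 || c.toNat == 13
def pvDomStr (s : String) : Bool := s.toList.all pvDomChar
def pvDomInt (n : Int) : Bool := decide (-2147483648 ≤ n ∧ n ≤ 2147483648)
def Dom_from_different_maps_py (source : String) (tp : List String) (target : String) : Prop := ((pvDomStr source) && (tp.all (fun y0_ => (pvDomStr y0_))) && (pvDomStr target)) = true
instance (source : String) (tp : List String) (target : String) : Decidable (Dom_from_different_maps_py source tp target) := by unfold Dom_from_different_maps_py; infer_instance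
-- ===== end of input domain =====

-- B rebuilds the check as compute-all-then-compare: collect every prefix, sort, scan once
-- for an equal adjacent pair (objective: alternative decomposition; no speed claim).

-- ===== PORT A =====
-- n.split('-')[0]: split with the nonempty separator "-" never raises (split? is none only
-- for sep = "") and always yields a nonempty list, so [0] is its head (headI); exact here.
def pvPrefixA (n : String) : String := ((PySem.Str.split? n "-").getD []).headI

-- the for-loop with its early return and the growing map_list accumulator
def pvLoopA (mapList : List String) (nodes : List String) : Bool :=
  match nodes with
  | [] => true
  | n :: rest =>
      let brainMap := pvPrefixA n
      if mapList.contains brainMap then false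
      else pvLoopA (mapList ++ [brainMap]) rest

def from_different_maps_py (source : String) (tp : List String) (target : String) : Bool :=
  pvLoopA [] (tp ++ [source, target])

-- ===== PORT B =====
-- the index loop 'for i in range(1, len): if p[i-1] == p[i]: return False', as the obvious
-- structural scan of adjacent pairs of the sorted prefix list
def pvNoAdjDup (l : List String) : Bool :=
  match l with
  | [] => true
  | [_] => true
  | x :: y :: rest => if x == y then false else pvNoAdjDup (y :: rest)

def from_different_maps_py_alt (source : String) (tp : List String) (target : String) : Bool :=
  pvNoAdjDup (PySem.List.sorted ((tp ++ [source, target]).map (fun n => ((PySem.Str.split? n "-").getD []).headI)) (fun x => x) false)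

-- ===== PRECONDITION & SPEC =====
def Spec_from_different_maps_py (source : String) (tp : List String) (target : String) (out : Bool) : Prop := out = from_different_maps_py_alt source tp target
instance (source : String) (tp : List String) (target : String) (out : Bool) : Decidable (Spec_from_different_maps_py source tp target out) := by unfold Spec_from_different_maps_py; infer_instance

-- ===== CLAIM (what is proved, stated in full; the proofs are below) =====
def Claim_equal_from_different_maps_py : Prop := ∀ (source : String) (tp : List String) (target : String), Dom_from_different_maps_py source tp target → Spec_from_different_maps_py source tp target (from_different_maps_py source tp target)

-- ===== LEMMAS AND PROOFS =====

-- A's loop succeeds exactly when the accumulated prefixes stay duplicate-free.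
theorem pvLoopA_eq_true_iff (nodes : List String) : ∀ (acc : List String), acc.Nodup →
    (pvLoopA acc nodes = true ↔ (acc ++ nodes.map pvPrefixA).Nodup) := by
  induction nodes with
  | nil => intro acc h; simp [pvLoopA, h]
  | cons n rest ih =>
      intro acc h
      simp only [pvLoopA]
      by_cases hm : pvPrefixA n ∈ acc
      · simp only [List.contains_iff_mem, if_pos hm]
        constructor
        · intro hfalse; exact absurd hfalse (by simp)
        · intro hnd
          exfalso
          have : (acc ++ pvPrefixA n :: rest.map pvPrefixA).Nodup := by simpa using hnd
          rcases List.nodup_append.mp this with ⟨_, h2, hdisj⟩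
          exact hdisj _ hm _ (by simp) rfl
      · simp only [List.contains_iff_mem, if_neg hm]
        have hacc' : (acc ++ [pvPrefixA n]).Nodup := by
          simp [List.nodup_append, h]
          intro a ha hEq; exact hm (hEq ▸ ha)
        rw [ih (acc ++ [pvPrefixA n]) hacc']
        simp

-- B's adjacent scan succeeds exactly when no two neighbours are equal.
theorem pvNoAdjDup_eq_true_iff (l : List String) : pvNoAdjDup l = true ↔ l.IsChain (· ≠ ·) := by
  induction l with
  | nil => simp [pvNoAdjDup]
  | cons x t ih =>
      cases t with
      | nil => simp [pvNoAdjDup]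
      | cons y rest =>
          simp only [pvNoAdjDup, List.isChain_cons_cons]
          by_cases hxy : x = y
          · simp [hxy]
          · simp only [beq_iff_eq, if_neg hxy, ih]
            tauto

-- on a (weakly) sorted list, no equal neighbours ↔ no duplicates at all
theorem pvSortedChainNodup (l : List String) (hs : l.Pairwise (· ≤ ·)) :
    l.IsChain (· ≠ ·) ↔ l.Nodup := by
  constructor
  · intro hc
    have hlt : l.IsChain (· < ·) := by
      induction l with
      | nil => simp
      | cons x t ih =>
          cases t with
          | nil => simp
          | cons y rest =>
              rw [List.isChain_cons_cons] at hc ⊢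
              rw [List.pairwise_cons] at hs
              exact ⟨lt_of_le_of_ne (hs.1 y (by simp)) hc.1, ih hs.2 hc.2⟩
    exact (List.isChain_iff_pairwise.mp hlt).imp ne_of_lt
  · intro hnd
    exact List.Pairwise.isChain hnd

-- ===== VERDICT (by name: the statement is the Claim_ definition above) =====
theorem from_different_maps_py_spec : Claim_equal_from_different_maps_py := by
  intro source tp target _
  unfold Spec_from_different_maps_py from_different_maps_py from_different_maps_py_alt
  set nodes := tp ++ [source, target] with hnodes
  set prefixes := nodes.map (fun n => ((PySem.Str.split? n "-").getD []).headI) with hp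
  have hA : pvLoopA [] nodes = true ↔ prefixes.Nodup := by
    simpa [pvPrefixA, hp] using pvLoopA_eq_true_iff nodes [] List.nodup_nil
  have hsortPerm : (PySem.List.sorted prefixes (fun x => x) false).Perm prefixes :=
    PySem.List.sorted_perm prefixes (fun x => x) false
  have hB : pvNoAdjDup (PySem.List.sorted prefixes (fun x => x) false) = true ↔ prefixes.Nodup := by
    rw [pvNoAdjDup_eq_true_iff,
        pvSortedChainNodup _ (PySem.List.sorted_pairwise prefixes (fun x => x))]
    exact hsortPerm.nodup_iff
  cases hval : pvLoopA [] nodes with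
  | true => exact (hB.mpr (hA.mp hval)).symm
  | false =>
      cases hval' : pvNoAdjDup (PySem.List.sorted prefixes (fun x => x) false) with
      | true => rw [hA.mpr (hB.mp hval')] at hval; exact absurd hval (by simp)
      | false => rfl
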